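-- pv_equiv track=rewrite | github.com/shivanshsinghx365/Practice | Competetive/Geeksforgeeks/Medium/Doge.py | doge_count
-- ===== SOURCE A (Python) =====
-- def doge_count(str):
--     count = 0
--     alpha ='qwertyuiopasdfghjklzxcvbnm'
--     for i in alpha:
--         l=str
--         k='do'+i+'e'
--         j=l.split(k)
--         z=len(j)
--         count = count + z - 1
--     ##Your code here
--     return count
-- ===== SOURCE B (Python) =====
-- def doge_count(str):
--     # One sliding-window pass: count positions where the next 4 chars are 'do<lowercase letter>e'.
--     count = 0
--     n = len(str)
--     i = 0
--     while i + 4 <= n: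
--         if str[i] == 'd' and str[i+1] == 'o' and str[i+2] in 'abcdefghijklmnopqrstuvwxyz' and str[i+3] == 'e':
--             count += 1
--         i += 1
--     return count
-- ===== Notes on version B (the rewrite author's own statement) =====
-- stated objective: alternative
-- what changed: Replaces 26 full-string split passes (one per letter) by a single sliding-window scan that tests each position's 4-character window once; same asymptotic cost, traded for one pass over the data.
import Mathlib
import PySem

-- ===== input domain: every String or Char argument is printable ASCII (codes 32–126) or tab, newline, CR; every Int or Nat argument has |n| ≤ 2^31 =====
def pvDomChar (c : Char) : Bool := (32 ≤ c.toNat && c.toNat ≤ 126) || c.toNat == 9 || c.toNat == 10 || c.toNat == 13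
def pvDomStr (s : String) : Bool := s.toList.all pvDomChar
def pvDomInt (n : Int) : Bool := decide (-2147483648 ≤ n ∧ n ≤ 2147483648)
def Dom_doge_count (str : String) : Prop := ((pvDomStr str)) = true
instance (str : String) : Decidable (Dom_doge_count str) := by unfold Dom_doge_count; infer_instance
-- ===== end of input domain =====

-- B replaces A's 26 per-letter split passes by one sliding-window scan over the string (objective: alternative single-pass algorithm).

-- ===== PORT A =====
-- A: for each of the 26 letters i, split the string on 'do'+i+'e' and add (#pieces - 1).
def doge_count (str : String) : Int :=
  ("qwertyuiopasdfghjklzxcvbnm".toList).foldl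
    (fun count i =>
      let l := str
      let k := String.ofList ['d', 'o', i, 'e']   -- 'do' + i + 'e'
      let j := (PySem.Str.split? l k).getD []     -- sep is never empty, so split? is always `some`
      let z : Int := j.length
      count + z - 1) 0

-- ===== PORT B =====
def pvLower : List Char := "abcdefghijklmnopqrstuvwxyz".toList

-- B's sliding window: test the 4-char window at each position, advance by one.
def pvScan : List Char → Int
  | x1 :: x2 :: x3 :: x4 :: t =>
      (if x1 = 'd' ∧ x2 = 'o' ∧ x3 ∈ pvLower ∧ x4 = 'e' then 1 else 0) + pvScan (x2 :: x3 :: x4 :: t)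
  | _ => 0

def doge_count_alt (str : String) : Int := pvScan str.toList

-- ===== PRECONDITION & SPEC =====
def Spec_doge_count (str : String) (out : Int) : Prop := out = doge_count_alt str
instance (str : String) (out : Int) : Decidable (Spec_doge_count str out) := by unfold Spec_doge_count; infer_instance

-- ===== CLAIM (what is proved, stated in full; the proofs are below) =====
def Claim_equal_doge_count : Prop := ∀ (str : String), Dom_doge_count str → Spec_doge_count str (doge_count str)

-- ===== LEMMAS AND PROOFS =====

-- greedy non-overlapping occurrence counter (the quantity `len(s.split(k)) - 1` computes)
def pvCnt (sep : List Char) : List Char → Nat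
  | [] => 0
  | c :: rest =>
      if sep.isPrefixOf (c :: rest) then 1 + pvCnt sep (rest.drop (sep.length - 1))
      else pvCnt sep rest
termination_by l => l.length
decreasing_by
  · simpa using Nat.lt_succ_of_le (List.length_drop_le _ _)
  · simp

lemma pvGoLen (sep : List Char) (hsep : sep ≠ []) :
    ∀ (fuel : Nat) (l cur : List Char) (acc : List (List Char)), l.length ≤ fuel →
      (PySem.Chars.splitOn.go sep fuel l cur acc).length = acc.length + 1 + pvCnt sep l := by
  intro fuel
  induction fuel with
  | zero =>
    intro l cur acc hl
    have : l = [] := List.length_eq_zero_iff.mp (Nat.le_zero.mp hl)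
    subst this
    simp [PySem.Chars.splitOn.go, pvCnt]
  | succ f ih =>
    intro l cur acc hl
    cases l with
    | nil => simp [PySem.Chars.splitOn.go, pvCnt]
    | cons c rest =>
      by_cases hp : sep.isPrefixOf (c :: rest)
      · have hslen : 1 ≤ sep.length := by
          cases sep with
          | nil => exact absurd rfl hsep
          | cons a s => simp
        have hdrop : List.drop sep.length (c :: rest) = rest.drop (sep.length - 1) := by
          obtain ⟨m, hm⟩ : ∃ m, sep.length = m + 1 := ⟨sep.length - 1, by omega⟩
          simp [hm]
        rw [PySem.Chars.splitOn.go]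
        simp only [hp, if_pos]
        rw [ih _ _ _ (by simp at hl ⊢; omega), hdrop]
        simp [pvCnt, hp]
        omega
      · rw [PySem.Chars.splitOn.go]
        simp only [hp, if_neg, Bool.not_eq_true]
        rw [ih _ _ _ (by simp at hl ⊢; omega)]
        simp [pvCnt, hp]

lemma pvSplitOnLen (l sep : List Char) (hsep : sep ≠ []) :
    (PySem.Chars.splitOn l sep).length = 1 + pvCnt sep l := by
  unfold PySem.Chars.splitOn
  rw [pvGoLen sep hsep _ _ _ _ (by omega)]
  simp

-- the pattern 'do?e' cannot overlap itself, so greedy counting steps one position at a time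
lemma pvCntStep (c x1 x2 x3 x4 : Char) (t : List Char) :
    pvCnt ['d','o',c,'e'] (x1 :: x2 :: x3 :: x4 :: t)
      = (if x1 = 'd' ∧ x2 = 'o' ∧ x3 = c ∧ x4 = 'e' then 1 else 0)
        + pvCnt ['d','o',c,'e'] (x2 :: x3 :: x4 :: t) := by
  by_cases h : x1 = 'd' ∧ x2 = 'o' ∧ x3 = c ∧ x4 = 'e'
  · obtain ⟨h1, h2, h3, h4⟩ := h
    subst h1; subst h2; subst h3; subst h4
    simp [pvCnt, List.isPrefixOf]
  · have hpre : (['d','o',c,'e'].isPrefixOf (x1 :: x2 :: x3 :: x4 :: t)) = false := by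
      simp [List.isPrefixOf]; tauto
    simp [pvCnt, hpre, h]

lemma pvSumInd (x : Char) :
    ∀ (l : List Char), l.Nodup →
      (l.map (fun c => if x = c then (1 : Int) else 0)).sum = if x ∈ l then 1 else 0 := by
  intro l
  induction l with
  | nil => simp
  | cons a l ih =>
    intro hnd
    rw [List.nodup_cons] at hnd
    by_cases hx : x = a
    · subst hx
      simp [ih hnd.2, hnd.1]
    · simp [hx, ih hnd.2]

-- the heart: per-position scan equals the sum over the 26 letters of the greedy split counts
set_option maxHeartbeats 1600000 in
lemma pvMain : ∀ (cs : List Char),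
    (("qwertyuiopasdfghjklzxcvbnm".toList).map
      (fun c => (pvCnt ['d','o',c,'e'] cs : Int))).sum = pvScan cs := by
  intro cs
  induction cs with
  | nil => simp [pvScan, pvCnt]
  | cons x1 rest ih =>
    rcases rest with _ | ⟨x2, _ | ⟨x3, _ | ⟨x4, t⟩⟩⟩
    · simp [pvScan, pvCnt, List.isPrefixOf]
    · simp [pvScan, pvCnt, List.isPrefixOf]
    · simp [pvScan, pvCnt, List.isPrefixOf]
    ·
      have hmap : (("qwertyuiopasdfghjklzxcvbnm".toList).map
          (fun c => (pvCnt ['d','o',c,'e'] (x1 :: x2 :: x3 :: x4 :: t) : Int)))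
        = (("qwertyuiopasdfghjklzxcvbnm".toList).map
          (fun c => (if x1 = 'd' ∧ x2 = 'o' ∧ x3 = c ∧ x4 = 'e' then (1 : Int) else 0)
            + (pvCnt ['d','o',c,'e'] (x2 :: x3 :: x4 :: t) : Int))) := by
        apply List.map_congr_left
        intro c _
        rw [pvCntStep]
        push_cast [apply_ite (fun n : Nat => (n : Int))]
        ring
      rw [hmap, PySem.List.sum_map_add_int, ih]
      by_cases hdoe : x1 = 'd' ∧ x2 = 'o' ∧ x4 = 'e'
      · obtain ⟨h1, h2, h4⟩ := hdoe
        subst h1; subst h2; subst h4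
        have hperm : ("qwertyuiopasdfghjklzxcvbnm".toList).Perm pvLower := by
          set_option maxHeartbeats 1000000 in decide
        have hnd : ("qwertyuiopasdfghjklzxcvbnm".toList).Nodup := by decide
        have hind := pvSumInd x3 _ hnd
        have hmem : (x3 ∈ "qwertyuiopasdfghjklzxcvbnm".toList) ↔ x3 ∈ pvLower := hperm.mem_iff
        simp only [true_and, and_true]
        have hscan : pvScan ('d' :: 'o' :: x3 :: 'e' :: t)
            = (if 'd' = 'd' ∧ 'o' = 'o' ∧ x3 ∈ pvLower ∧ 'e' = 'e' then (1 : Int) else 0)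
              + pvScan ('o' :: x3 :: 'e' :: t) := rfl
        by_cases hm : x3 ∈ pvLower
        · rw [hind, if_pos (hmem.mpr hm), hscan, if_pos ⟨rfl, rfl, hm, rfl⟩]
        · rw [hind, if_neg (fun h => hm (hmem.mp h)), hscan, if_neg (by tauto)]
      · have hz : (("qwertyuiopasdfghjklzxcvbnm".toList).map
            (fun c => (if x1 = 'd' ∧ x2 = 'o' ∧ x3 = c ∧ x4 = 'e' then (1 : Int) else 0))).sum = 0 := by
          rw [show (fun c => if x1 = 'd' ∧ x2 = 'o' ∧ x3 = c ∧ x4 = 'e' then (1 : Int) else 0)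
                = (fun _ : Char => (0 : Int)) by funext c; simp; tauto]
          simp
        rw [hz]
        have : pvScan (x1 :: x2 :: x3 :: x4 :: t)
            = (if x1 = 'd' ∧ x2 = 'o' ∧ x3 ∈ pvLower ∧ x4 = 'e' then (1:Int) else 0)
              + pvScan (x2 :: x3 :: x4 :: t) := rfl
        rw [this, if_neg (by tauto)]

-- one split-pass of A, expressed through pvCnt
lemma pvSplitLen (str : String) (i : Char) :
    (((PySem.Str.split? str (String.ofList ['d','o',i,'e'])).getD []).length : Int)
      = 1 + (pvCnt ['d','o',i,'e'] str.toList : Int) := by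
  have : PySem.Str.split? str (String.ofList ['d','o',i,'e'])
      = some (List.map String.ofList (PySem.Chars.splitOn str.toList ['d','o',i,'e'])) := by
    simp [PySem.Str.split?, PySem.Chars.split?]
  rw [this]
  simp only [Option.getD_some, List.length_map]
  rw [pvSplitOnLen str.toList ['d','o',i,'e'] (by simp)]
  push_cast
  ring

-- ===== VERDICT (by name: the statement is the Claim_ definition above) =====
theorem doge_count_spec : Claim_equal_doge_count := by
  intro str _
  unfold Spec_doge_count doge_count doge_count_alt
  simp only []
  rw [show (fun (count : Int) (i : Char) =>
        count + (((PySem.Str.split? str (String.ofList ['d','o',i,'e'])).getD []).length : Int) - 1)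
      = (fun (count : Int) (i : Char) => count + (pvCnt ['d','o',i,'e'] str.toList : Int)) by
    funext count i; rw [pvSplitLen]; ring]
  rw [PySem.List.foldl_add]
  rw [pvMain]
  omega
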